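-- pv_equiv track=rewrite | github.com/logflux/logflux | tests/test_reentrable.py | detect_notentrable
-- ===== SOURCE A (Python) =====
-- def detect_notentrable(exp_res):
--     #exp_res is generated by run_exp,
--     #its structure dconf, pconf, rseed, iround, entrable
--     notentrable = []
--     for dconf, dconfres in exp_res.items():
--         for pconf, pconfres in dconfres.items():
--             for rseed, rseedres in pconfres.items():
--                 for exp_grp, exp_grpres in rseedres.items():
--                     #reentrable
--                     if exp_grpres is False:
--                         notentrable.append((dconf, pconf, rseed, exp_grp, exp_grpres))
--
--     return notentrable
-- ===== SOURCE B (Python) =====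
-- def detect_notentrable(exp_res):
--     # Staged flattening: expand one dict level per pass, then a single filter.
--     l1 = [((d,), dr) for d, dr in exp_res.items()]
--     l2 = [(path + (p,), pr) for path, dr in l1 for p, pr in dr.items()]
--     l3 = [(path + (r,), rr) for path, pr in l2 for r, rr in pr.items()]
--     l4 = [(path + (g,), v) for path, rr in l3 for g, v in rr.items()]
--     return [path + (v,) for path, v in l4 if v is False]
-- ===== Notes on version B (the rewrite author's own statement) =====
-- stated objective: alternative
-- what changed: Replaced the four nested loops with an inner filter-and-append by four successive one-level flattening passes that build explicit (key-path, subtree) lists, followed by a single final filter over the fully flattened list.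
import Mathlib
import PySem

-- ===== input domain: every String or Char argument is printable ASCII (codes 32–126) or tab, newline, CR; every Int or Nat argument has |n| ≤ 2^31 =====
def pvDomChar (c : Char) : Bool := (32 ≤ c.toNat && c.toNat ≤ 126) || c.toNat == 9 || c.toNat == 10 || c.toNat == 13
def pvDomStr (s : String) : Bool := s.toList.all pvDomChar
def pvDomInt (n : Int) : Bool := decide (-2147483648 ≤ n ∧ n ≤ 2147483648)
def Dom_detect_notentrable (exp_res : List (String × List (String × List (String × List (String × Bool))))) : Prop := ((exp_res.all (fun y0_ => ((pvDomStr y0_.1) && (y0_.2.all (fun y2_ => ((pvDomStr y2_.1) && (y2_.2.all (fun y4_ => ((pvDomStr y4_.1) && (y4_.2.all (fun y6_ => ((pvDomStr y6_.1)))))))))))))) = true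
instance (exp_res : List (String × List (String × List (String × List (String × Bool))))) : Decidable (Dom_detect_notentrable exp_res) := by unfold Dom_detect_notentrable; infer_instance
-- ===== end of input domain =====

-- B replaces the nested loops by staged one-level flattening passes and a single final filter (alternative decomposition, same cost).
-- ===== PORT A =====
def detect_notentrable (exp_res : List (String × List (String × List (String × List (String × Bool))))) : List (String × String × String × String × Bool) :=
  exp_res.foldl (fun acc d =>
    d.2.foldl (fun acc p =>
      p.2.foldl (fun acc r =>
        r.2.foldl (fun acc g =>
          if g.2 = false then acc ++ [(d.1, p.1, r.1, g.1, g.2)] else acc) acc) acc) acc) []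

-- ===== PORT B =====
def detect_notentrable_alt (exp_res : List (String × List (String × List (String × List (String × Bool))))) : List (String × String × String × String × Bool) :=
  let l1 := exp_res.map (fun d => (d.1, d.2))
  let l2 := l1.flatMap (fun x => x.2.map (fun p => ((x.1, p.1), p.2)))
  let l3 := l2.flatMap (fun x => x.2.map (fun r => ((x.1.1, x.1.2, r.1), r.2)))
  let l4 := l3.flatMap (fun x => x.2.map (fun g => ((x.1.1, x.1.2.1, x.1.2.2, g.1), g.2)))
  (l4.filter (fun x => x.2 = false)).map (fun x => (x.1.1, x.1.2.1, x.1.2.2.1, x.1.2.2.2, x.2))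

-- ===== PRECONDITION & SPEC =====
def Spec_detect_notentrable (exp_res : List (String × List (String × List (String × List (String × Bool))))) (out : List (String × String × String × String × Bool)) : Prop := out = detect_notentrable_alt exp_res
instance (exp_res : List (String × List (String × List (String × List (String × Bool))))) (out : List (String × String × String × String × Bool)) : Decidable (Spec_detect_notentrable exp_res out) := by unfold Spec_detect_notentrable; infer_instance

-- ===== CLAIM (what is proved, stated in full; the proofs are below) =====
def Claim_equal_detect_notentrable : Prop := ∀ (exp_res : List (String × List (String × List (String × List (String × Bool))))), Dom_detect_notentrable exp_res → Spec_detect_notentrable exp_res (detect_notentrable exp_res)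

-- ===== LEMMAS AND PROOFS =====

-- canonical nested-flatMap form both ports are reduced to
def pvCanon (exp_res : List (String × List (String × List (String × List (String × Bool))))) : List (String × String × String × String × Bool) :=
  exp_res.flatMap (fun d => d.2.flatMap (fun p => p.2.flatMap (fun r =>
    (r.2.filter (fun g => g.2 = false)).map (fun g => (d.1, p.1, r.1, g.1, g.2)))))

theorem lvl4 (d p r : String) : ∀ (rr : List (String × Bool)) (acc : List (String × String × String × String × Bool)),
    rr.foldl (fun acc g => if g.2 = false then acc ++ [(d, p, r, g.1, g.2)] else acc) acc
      = acc ++ (rr.filter (fun g => g.2 = false)).map (fun g => (d, p, r, g.1, g.2)) := by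
  intro rr
  induction rr with
  | nil => intro acc; simp
  | cons g t ih =>
    intro acc
    obtain ⟨k, v⟩ := g
    cases v <;> simp [ih, List.append_assoc]

theorem lvl3 (d p : String) : ∀ (pr : List (String × List (String × Bool))) (acc : List (String × String × String × String × Bool)),
    pr.foldl (fun acc r => r.2.foldl (fun acc g => if g.2 = false then acc ++ [(d, p, r.1, g.1, g.2)] else acc) acc) acc
      = acc ++ pr.flatMap (fun r => (r.2.filter (fun g => g.2 = false)).map (fun g => (d, p, r.1, g.1, g.2))) := by
  intro pr
  induction pr with
  | nil => intro acc; simp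
  | cons r t ih =>
    intro acc
    simp [List.foldl_cons, lvl4, List.append_assoc, List.flatMap_def]

theorem lvl2 (d : String) : ∀ (dr : List (String × List (String × List (String × Bool)))) (acc : List (String × String × String × String × Bool)),
    dr.foldl (fun acc p => p.2.foldl (fun acc r => r.2.foldl (fun acc g => if g.2 = false then acc ++ [(d, p.1, r.1, g.1, g.2)] else acc) acc) acc) acc
      = acc ++ dr.flatMap (fun p => p.2.flatMap (fun r => (r.2.filter (fun g => g.2 = false)).map (fun g => (d, p.1, r.1, g.1, g.2)))) := by
  intro dr
  induction dr with
  | nil => intro acc; simp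
  | cons p t ih =>
    intro acc
    simp [List.foldl_cons, lvl3, List.append_assoc, List.flatMap_def]

theorem a_eq_canon : ∀ (exp_res : List (String × List (String × List (String × List (String × Bool))))),
    detect_notentrable exp_res = pvCanon exp_res := by
  intro exp_res
  have h : ∀ (l : List (String × List (String × List (String × List (String × Bool))))) (acc : List (String × String × String × String × Bool)),
      l.foldl (fun acc d => d.2.foldl (fun acc p => p.2.foldl (fun acc r => r.2.foldl (fun acc g => if g.2 = false then acc ++ [(d.1, p.1, r.1, g.1, g.2)] else acc) acc) acc) acc) acc
        = acc ++ pvCanon l := by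
    intro l
    induction l with
    | nil => intro acc; simp [pvCanon]
    | cons d t ih =>
      intro acc
      simp [pvCanon, List.foldl_cons, lvl2, List.append_assoc, List.flatMap_def]
  simpa [detect_notentrable] using h exp_res []

theorem bLvl4 (d p r : String) : ∀ (rr : List (String × Bool)),
    ((rr.map (fun g => ((d, p, r, g.1), g.2))).filter (fun x => x.2 = false)).map
        (fun x => (x.1.1, x.1.2.1, x.1.2.2.1, x.1.2.2.2, x.2))
      = (rr.filter (fun g => g.2 = false)).map (fun g => (d, p, r, g.1, g.2)) := by
  intro rr
  simp only [List.filter_map, List.map_map]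
  rfl

theorem bLvl3 (d p : String) : ∀ (pr : List (String × List (String × Bool))),
    (((pr.map (fun r => ((d, p, r.1), r.2))).flatMap
        (fun x => x.2.map (fun g => ((x.1.1, x.1.2.1, x.1.2.2, g.1), g.2)))).filter
          (fun x => x.2 = false)).map (fun x => (x.1.1, x.1.2.1, x.1.2.2.1, x.1.2.2.2, x.2))
      = pr.flatMap (fun r => (r.2.filter (fun g => g.2 = false)).map (fun g => (d, p, r.1, g.1, g.2))) := by
  intro pr
  induction pr with
  | nil => simp
  | cons r t ih =>
    simp only [List.map_cons, List.flatMap_cons, List.filter_append, List.map_append, ih]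
    rw [bLvl4]

theorem bLvl2 (d : String) : ∀ (dr : List (String × List (String × List (String × Bool)))),
    ((((dr.map (fun p => ((d, p.1), p.2))).flatMap
        (fun x => x.2.map (fun r => ((x.1.1, x.1.2, r.1), r.2)))).flatMap
          (fun x => x.2.map (fun g => ((x.1.1, x.1.2.1, x.1.2.2, g.1), g.2)))).filter
            (fun x => x.2 = false)).map (fun x => (x.1.1, x.1.2.1, x.1.2.2.1, x.1.2.2.2, x.2))
      = dr.flatMap (fun p => p.2.flatMap (fun r =>
          (r.2.filter (fun g => g.2 = false)).map (fun g => (d, p.1, r.1, g.1, g.2)))) := by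
  intro dr
  induction dr with
  | nil => simp
  | cons p t ih =>
    simp only [List.map_cons, List.flatMap_cons, List.flatMap_append, List.filter_append,
      List.map_append, ih]
    rw [bLvl3]

theorem b_eq_canon : ∀ (exp_res : List (String × List (String × List (String × List (String × Bool))))),
    detect_notentrable_alt exp_res = pvCanon exp_res := by
  intro exp_res
  induction exp_res with
  | nil => simp [detect_notentrable_alt, pvCanon]
  | cons d t ih =>
    simp only [detect_notentrable_alt, pvCanon, List.map_cons, List.flatMap_cons,
      List.flatMap_append, List.filter_append, List.map_append] at *
    rw [ih, bLvl2]

-- ===== VERDICT (by name: the statement is the Claim_ definition above) =====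
theorem detect_notentrable_spec : Claim_equal_detect_notentrable := by
  intro exp_res _
  unfold Spec_detect_notentrable
  rw [a_eq_canon, b_eq_canon]
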